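-- pv_equiv track=rewrite | github.com/derekchen14/handling-ambiguity | datasets/data_aug/sampler.py | decompose_dax
-- ===== SOURCE A (Python) =====
-- def decompose_dax(dax_code: str, dact_catalog: dict) -> str:
--     """Decompose a DAX code into its dact primitives.
--
--     Example: '{03A}' with Hugo catalog → 'chat(0) + compose(3) + post(A)'
--     """
--     # Build reverse lookup: hex digit → dact name
--     hex_to_name = {}
--     for dact_name, info in dact_catalog.items():
--         hex_to_name[info['hex'].upper()] = dact_name
--
--     # Strip braces
--     code = dax_code.strip('{}')
--
--     parts = []
--     for digit in code:
--         name = hex_to_name.get(digit.upper(), f'?{digit}')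
--         parts.append(f'{name}({digit.upper()})')
--
--     return ' + '.join(parts)
-- ===== SOURCE B (Python) =====
-- def decompose_dax(dax_code: str, dact_catalog: dict) -> str:
--     """Decompose a DAX code by scanning the catalog directly for each digit
--     (last matching entry wins, mirroring dict overwrite), no reverse index."""
--     code = dax_code.strip('{}')
--     parts = []
--     for digit in code:
--         d = digit.upper()
--         name = '?' + digit
--         for dact_name, info in dact_catalog.items():
--             if info.get('hex', '').upper() == d:
--                 name = dact_name
--         parts.append(name + '(' + d + ')')
--     return ' + '.join(parts)
-- ===== Notes on version B (the rewrite author's own statement) =====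
-- stated objective: alternative
-- what changed: B drops A's build-a-reverse-index-then-lookup strategy and instead, per digit, scans the catalog directly keeping the last entry whose hex matches (the dict's last-wins overwrite), so no intermediate dict exists.
import Mathlib
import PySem

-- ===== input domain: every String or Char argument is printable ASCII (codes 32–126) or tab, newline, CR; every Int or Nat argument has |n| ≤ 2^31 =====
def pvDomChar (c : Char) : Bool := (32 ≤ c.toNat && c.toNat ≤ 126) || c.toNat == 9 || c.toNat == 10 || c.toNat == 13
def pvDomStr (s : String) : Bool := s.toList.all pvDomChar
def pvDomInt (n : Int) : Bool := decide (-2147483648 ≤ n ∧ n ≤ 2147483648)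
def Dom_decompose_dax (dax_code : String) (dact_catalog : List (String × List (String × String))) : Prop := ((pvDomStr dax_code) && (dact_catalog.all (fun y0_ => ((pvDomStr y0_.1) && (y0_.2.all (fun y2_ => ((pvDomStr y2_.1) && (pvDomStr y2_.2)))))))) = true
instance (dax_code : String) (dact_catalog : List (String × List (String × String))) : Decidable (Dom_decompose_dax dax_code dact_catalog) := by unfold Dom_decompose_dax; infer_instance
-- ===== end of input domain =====

-- B replaces A's reverse-index-then-lookup with a direct per-digit last-match scan of the catalog (no intermediate dict); equivalence is on the return value.

-- ===== PORT A =====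
-- A builds hex→name (dict insert = last wins), strips braces, then maps each digit through the dict.
-- info['hex'] raises KeyError when absent: the Option-threaded fold returns none exactly there (excluded by Pre_; "" is the unreachable placeholder).
def decompose_dax (dax_code : String) (dact_catalog : List (String × List (String × String))) : String :=
  let hexToName? : Option (PySem.Dict String String) :=
    dact_catalog.foldl (fun d? p =>
      match d? with
      | none => none
      | some d =>
        match (PySem.Dict.mk p.2).get? "hex" with
        | none => none        -- KeyError: info['hex']
        | some h => some (d.insert (PySem.Str.upper h) p.1)) (some PySem.Dict.empty)
  match hexToName? with
  | none => ""
  | some hexToName =>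
    let code := PySem.Str.stripChars dax_code "{}"
    let parts := code.toList.foldl (fun parts digit =>
      let du := PySem.Str.upper (String.mk [digit])
      let name := hexToName.getD du ("?" ++ String.mk [digit])
      parts ++ [name ++ "(" ++ du ++ ")"]) []
    PySem.Str.join " + " parts

-- ===== PORT B =====
def decompose_dax_alt (dax_code : String) (dact_catalog : List (String × List (String × String))) : String :=
  let code := PySem.Str.stripChars dax_code "{}"
  let parts := code.toList.foldl (fun parts digit =>
    let d := PySem.Str.upper (String.mk [digit])
    let name := dact_catalog.foldl (fun name p =>
      if PySem.Str.upper ((PySem.Dict.mk p.2).getD "hex" "") == d then p.1 else name)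
      ("?" ++ String.mk [digit])
    parts ++ [name ++ "(" ++ d ++ ")"]) []
  PySem.Str.join " + " parts

-- ===== PRECONDITION & SPEC =====
-- Pre_ excludes exactly the catalogs in which some entry lacks the 'hex' key: there A raises KeyError.
def Pre_decompose_dax (dax_code : String) (dact_catalog : List (String × List (String × String))) : Prop :=
  ∀ p ∈ dact_catalog, ((PySem.Dict.mk p.2).get? "hex").isSome = true
instance (dax_code : String) (dact_catalog : List (String × List (String × String))) : Decidable (Pre_decompose_dax dax_code dact_catalog) := by unfold Pre_decompose_dax; infer_instance

def pvWitness_decompose_dax : String × (List (String × List (String × String))) :=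
  ("{03A}", [("chat", [("hex", "0")]), ("compose", [("hex", "3")]), ("post", [("hex", "a")])])

def Spec_decompose_dax (dax_code : String) (dact_catalog : List (String × List (String × String))) (out : String) : Prop := out = decompose_dax_alt dax_code dact_catalog
instance (dax_code : String) (dact_catalog : List (String × List (String × String))) (out : String) : Decidable (Spec_decompose_dax dax_code dact_catalog out) := by unfold Spec_decompose_dax; infer_instance

-- ===== CLAIM (what is proved, stated in full; the proofs are below) =====
def Claim_equal_decompose_dax : Prop := ∀ (dax_code : String) (dact_catalog : List (String × List (String × String))), Dom_decompose_dax dax_code dact_catalog → Pre_decompose_dax dax_code dact_catalog → Spec_decompose_dax dax_code dact_catalog (decompose_dax dax_code dact_catalog)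

-- ===== LEMMAS AND PROOFS =====

-- A's Option-threaded index build succeeds under Pre_ and equals the plain insert fold.
theorem buildA_eq (l : List (String × List (String × String)))
    (h : ∀ p ∈ l, ((PySem.Dict.mk p.2).get? "hex").isSome = true)
    (d : PySem.Dict String String) :
    l.foldl (fun d? p =>
      match d? with
      | none => none
      | some d =>
        match (PySem.Dict.mk p.2).get? "hex" with
        | none => none
        | some h => some (d.insert (PySem.Str.upper h) p.1)) (some d)
    = some (l.foldl (fun d p =>
        d.insert (PySem.Str.upper ((PySem.Dict.mk p.2).getD "hex" "")) p.1) d) := by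
  induction l generalizing d with
  | nil => rfl
  | cons p l ih =>
    obtain ⟨h0, hrest⟩ := List.forall_mem_cons.mp h
    obtain ⟨hx, hhx⟩ := Option.isSome_iff_exists.mp h0
    have hg : (PySem.Dict.mk p.2).getD "hex" "" = hx := by
      rw [PySem.Dict.getD_eq_get?_getD, hhx]; rfl
    simp only [List.foldl_cons, hhx, hg]
    exact ih hrest _

-- last-wins dict lookup = last-match scan of the insert list
theorem getD_foldl_insert_eq_scan (l : List (String × List (String × String)))
    (d : PySem.Dict String String) (k dflt : String) :
    (l.foldl (fun d p =>
        d.insert (PySem.Str.upper ((PySem.Dict.mk p.2).getD "hex" "")) p.1) d).getD k dflt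
    = l.foldl (fun name p =>
        if PySem.Str.upper ((PySem.Dict.mk p.2).getD "hex" "") == k then p.1 else name)
        (d.getD k dflt) := by
  induction l generalizing d with
  | nil => rfl
  | cons p l ih =>
    simp only [List.foldl_cons, ih, PySem.Dict.getD_insert]
    congr 1
    simp only [beq_iff_eq]
    by_cases hk : k = PySem.Str.upper ((PySem.Dict.mk p.2).getD "hex" "")
    · rw [if_pos hk, if_pos hk.symm]
    · rw [if_neg hk, if_neg (fun h => hk h.symm)]

-- ===== VERDICT (by name: the statement is the Claim_ definition above) =====
theorem decompose_dax_spec : Claim_equal_decompose_dax := by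
  intro dax_code dact_catalog _ hpre
  unfold Spec_decompose_dax decompose_dax decompose_dax_alt
  rw [buildA_eq dact_catalog hpre]
  simp only []
  congr 1
  congr 1
  funext parts digit
  rw [getD_foldl_insert_eq_scan, PySem.Dict.getD_empty]
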